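-- pv_equiv track=rewrite | github.com/GroenewaldM/Projects | M_python/isValidWord.py | isValidWord
-- ===== SOURCE A (Python) =====
-- def isValidWord(word, hand, wordList):
--     hand_copy = hand.copy()
--
--     for letter in word:
--
--         if letter not in hand:
--             return False
--         elif hand_copy[letter] <= 0:
--             return False
--         else:
--             hand_copy[letter] -= 1
--
--     if word in wordList:
--         return True
--     else:
--         return False
-- ===== SOURCE B (Python) =====
-- def isValidWord(word, hand, wordList):
--     need = {}
--     for letter in word:
--         need[letter] = need.get(letter, 0) + 1
--     for letter, n in need.items():
--         if hand.get(letter, 0) < n: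
--             return False
--     return word in wordList
-- ===== Notes on version B (the rewrite author's own statement) =====
-- stated objective: simpler
-- what changed: B counts the word's letters once into a frequency table and compares each distinct letter's needed count against hand.get(letter, 0), instead of mutating a copy of hand and decrementing it letter by letter with membership checks; the wordlist test becomes a direct 'word in wordList'.
import Mathlib
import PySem

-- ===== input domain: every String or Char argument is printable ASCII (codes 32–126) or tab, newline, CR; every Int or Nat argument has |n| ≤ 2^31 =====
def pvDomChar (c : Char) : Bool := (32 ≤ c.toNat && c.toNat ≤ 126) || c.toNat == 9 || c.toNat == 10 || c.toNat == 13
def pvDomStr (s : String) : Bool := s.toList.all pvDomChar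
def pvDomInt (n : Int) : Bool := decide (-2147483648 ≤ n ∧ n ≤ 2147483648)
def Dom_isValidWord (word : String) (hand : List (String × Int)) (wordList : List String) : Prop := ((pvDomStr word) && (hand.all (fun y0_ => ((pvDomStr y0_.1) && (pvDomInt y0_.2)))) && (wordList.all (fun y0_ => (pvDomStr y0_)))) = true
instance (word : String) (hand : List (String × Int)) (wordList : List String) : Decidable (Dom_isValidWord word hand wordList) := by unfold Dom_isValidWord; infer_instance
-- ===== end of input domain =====

-- B counts the word's letters once and compares distinct-letter counts against the hand,
-- instead of decrementing a mutated copy of the hand letter by letter (objective: simpler).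


-- iterating a Python str yields 1-character strings (the dict keys)
def pvKey (c : Char) : String := String.ofList [c]

-- ===== PORT A =====
-- the 'for letter in word' loop: early 'return False' = false, falling through = the wordList test
def isValidWordGo (hand : PySem.Dict String Int) (word : String) (wordList : List String) :
    List Char → PySem.Dict String Int → Bool
  | [], _ => if wordList.contains word then true else false
  | c :: cs, handCopy =>
      if !(hand.contains (pvKey c)) then false
      else if handCopy.getD (pvKey c) 0 ≤ 0 then false
      else isValidWordGo hand word wordList cs (handCopy.modify (pvKey c) 0 (· - 1))

def isValidWord (word : String) (hand : List (String × Int)) (wordList : List String) : Bool :=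
  isValidWordGo (PySem.Dict.mk hand) word wordList word.toList (PySem.Dict.mk hand)

-- ===== PORT B =====
def isValidWord_alt (word : String) (hand : List (String × Int)) (wordList : List String) : Bool :=
  ((word.toList.map pvKey).foldl
      (fun nd k => nd.insert k (nd.getD k 0 + 1)) PySem.Dict.empty).items.all
    (fun p => !((PySem.Dict.mk hand).getD p.1 0 < p.2)) && wordList.contains word

-- ===== PRECONDITION & SPEC =====
def Spec_isValidWord (word : String) (hand : List (String × Int)) (wordList : List String) (out : Bool) : Prop := out = isValidWord_alt word hand wordList
instance (word : String) (hand : List (String × Int)) (wordList : List String) (out : Bool) : Decidable (Spec_isValidWord word hand wordList out) := by unfold Spec_isValidWord; infer_instance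

-- ===== CLAIM (what is proved, stated in full; the proofs are below) =====
def Claim_equal_isValidWord : Prop := ∀ (word : String) (hand : List (String × Int)) (wordList : List String), Dom_isValidWord word hand wordList → Spec_isValidWord word hand wordList (isValidWord word hand wordList)

-- ===== LEMMAS AND PROOFS =====

theorem pvKey_inj {a b : Char} (h : pvKey a = pvKey b) : a = b := by
  have := congrArg String.toList h
  simpa [pvKey] using this

-- invariant of A's loop: it returns true iff every letter still has enough budget in handCopy
-- (membership checked against the original hand) and the word is in the list
theorem isValidWordGo_eq (hand : PySem.Dict String Int) (word : String) (wordList : List String)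
    (cs : List Char) (handCopy : PySem.Dict String Int) :
    isValidWordGo hand word wordList cs handCopy =
      (decide (∀ c ∈ cs, hand.contains (pvKey c) = true ∧
          (cs.count c : Int) ≤ handCopy.getD (pvKey c) 0) && wordList.contains word) := by
  induction cs generalizing handCopy with
  | nil => simp [isValidWordGo]
  | cons c cs ih =>
    by_cases hc : hand.contains (pvKey c) = true
    · by_cases hle : handCopy.getD (pvKey c) 0 ≤ 0
      · have hfail : ¬ (∀ c' ∈ c :: cs, hand.contains (pvKey c') = true ∧
            ((c :: cs).count c' : Int) ≤ handCopy.getD (pvKey c') 0) := by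
          intro h
          have := (h c (List.mem_cons_self)).2
          have hcnt : 1 ≤ (c :: cs).count c := by
            simpa using List.count_pos_iff.mpr (List.mem_cons_self)
          omega
        have hd : decide (∀ c' ∈ c :: cs, hand.contains (pvKey c') = true ∧
            ((c :: cs).count c' : Int) ≤ handCopy.getD (pvKey c') 0) = false :=
          decide_eq_false hfail
        rw [hd, Bool.false_and]
        simp [isValidWordGo, hc, hle]
      · have hiff : (∀ c' ∈ cs, hand.contains (pvKey c') = true ∧
            (cs.count c' : Int) ≤ (handCopy.modify (pvKey c) 0 (· - 1)).getD (pvKey c') 0)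
            ↔ (∀ c' ∈ c :: cs, hand.contains (pvKey c') = true ∧
            ((c :: cs).count c' : Int) ≤ handCopy.getD (pvKey c') 0) := by
          constructor
          · intro h c' hc'
            rcases List.mem_cons.mp hc' with rfl | hm
            · refine ⟨hc, ?_⟩
              by_cases hmem : c' ∈ cs
              · have h2 := (h c' hmem).2
                rw [PySem.Dict.getD_modify] at h2
                simp at h2
                have : (c' :: cs).count c' = cs.count c' + 1 := by
                  simp
                omega
              · have h0 : cs.count c' = 0 := List.count_eq_zero.mpr hmem
                have : (c' :: cs).count c' = 1 := by simp [h0]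
                omega
            · obtain ⟨h1, h2⟩ := h c' hm
              refine ⟨h1, ?_⟩
              rw [PySem.Dict.getD_modify] at h2
              by_cases hcc : pvKey c' = pvKey c
              · have hcc' : c' = c := pvKey_inj hcc
                subst hcc'
                simp at h2
                have : (c' :: cs).count c' = cs.count c' + 1 := by
                  simp
                omega
              · simp [hcc] at h2
                have hne : c' ≠ c := fun h => hcc (by rw [h])
                have : (c :: cs).count c' = cs.count c' := by
                  simp [Ne.symm hne]
                omega
          · intro h c' hm
            obtain ⟨h1, h2⟩ := h c' (List.mem_cons_of_mem _ hm)
            refine ⟨h1, ?_⟩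
            rw [PySem.Dict.getD_modify]
            by_cases hcc : pvKey c' = pvKey c
            · have hcc' : c' = c := pvKey_inj hcc
              subst hcc'
              simp
              have : (c' :: cs).count c' = cs.count c' + 1 := by
                simp
              omega
            · simp [hcc]
              have hne : c' ≠ c := fun h => hcc (by rw [h])
              have : (c :: cs).count c' = cs.count c' := by
                simp [Ne.symm hne]
              omega
        rw [isValidWordGo]
        simp only [hc, hle]
        rw [ih]
        simp [decide_eq_decide.mpr hiff]
    · have hfail : ¬ (∀ c' ∈ c :: cs, hand.contains (pvKey c') = true ∧
          ((c :: cs).count c' : Int) ≤ handCopy.getD (pvKey c') 0) := by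
        intro h
        exact hc (h c (List.mem_cons_self)).1
      have hd : decide (∀ c' ∈ c :: cs, hand.contains (pvKey c') = true ∧
          ((c :: cs).count c' : Int) ≤ handCopy.getD (pvKey c') 0) = false :=
        decide_eq_false hfail
      rw [hd, Bool.false_and]
      simp [isValidWordGo, hc]

-- B's counter-scan returns true iff every letter's total need fits in the hand
set_option maxRecDepth 10000 in
theorem isValidWord_alt_eq (word : String) (hand : List (String × Int)) (wordList : List String) :
    isValidWord_alt word hand wordList =
      (decide (∀ c ∈ word.toList, ((word.toList.map pvKey).count (pvKey c) : Int)
          ≤ (PySem.Dict.mk hand).getD (pvKey c) 0) && wordList.contains word) := by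
  unfold isValidWord_alt
  rw [PySem.Dict.foldl_insert_getD_add_one_eq_counter, PySem.Dict.items_counter]
  simp only [List.all_map]
  refine congrArg (fun x => x && wordList.contains word) ?_
  rw [Bool.eq_iff_iff]
  simp only [List.all_eq_true, Function.comp_apply, Bool.not_eq_true',
    decide_eq_false_iff_not, not_lt, decide_eq_true_eq]
  constructor
  · intro h c hcmem
    exact h _ ((PySem.Set.mem_ofList _ _).mpr (List.mem_map_of_mem hcmem))
  · intro h k hk
    obtain ⟨c, hcmem, rfl⟩ := List.mem_map.mp ((PySem.Set.mem_ofList _ _).mp hk)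
    exact h c hcmem

-- ===== VERDICT (by name: the statement is the Claim_ definition above) =====
set_option maxRecDepth 10000 in
theorem isValidWord_spec : Claim_equal_isValidWord := by
  intro word hand wordList _
  show isValidWord word hand wordList = isValidWord_alt word hand wordList
  unfold isValidWord
  rw [isValidWordGo_eq, isValidWord_alt_eq]
  refine congrArg (fun x => x && wordList.contains word) ?_
  rw [decide_eq_decide]
  constructor
  · intro h c hm
    have h2 := (h c hm).2
    have hcount : (word.toList.map pvKey).count (pvKey c) = word.toList.count c :=
      List.count_map_of_injective _ _ (fun a b => pvKey_inj) c
    rw [hcount]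
    exact h2
  · intro h c hm
    have h2 := h c hm
    have hcount : (word.toList.map pvKey).count (pvKey c) = word.toList.count c :=
      List.count_map_of_injective _ _ (fun a b => pvKey_inj) c
    rw [hcount] at h2
    refine ⟨?_, h2⟩
    by_cases hc : (PySem.Dict.mk hand).contains (pvKey c) = true
    · exact hc
    · exfalso
      have h0 : (PySem.Dict.mk hand).getD (pvKey c) 0 = 0 :=
        PySem.Dict.getD_of_not_contains _ _ (by rw [← Bool.not_eq_true]; exact hc)
      have hcnt : 1 ≤ word.toList.count c := List.count_pos_iff.mpr hm
      omega
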